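-- pv_equiv track=rewrite | github.com/JianJX/algorithms | algorithm/h1.py | get_health
-- ===== SOURCE A (Python) =====
-- def get_health(d, g, h):
--     total = 0
--     gh_map = { }
--     for i in range(len(g)):
--         if g[i] not in gh_map:
--             gh_map[g[i]] = h[i]
--         else:
--             gh_map[g[i]] += h[i]
--     sub_strs = [ ]
--     for i in range(1, len(d) + 1): #0 1 2 3 4
--         index = 0
--         while index < len(d) - i + 1: #5 4 3 2 1
--             sub_str = d[index:index + i]
--             sub_strs.append(sub_str)
--             index += 1
--     for s in sub_strs:
--          if s in g:
--             total += gh_map[s]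
--     return total
-- ===== SOURCE B (Python) =====
-- def get_health(d, g, h):
--     # Aggregate health per distinct gene, then count each gene's (overlapping)
--     # occurrences in d with one window scan per distinct gene, instead of
--     # enumerating every substring of d. An empty gene never occurs as a
--     # substring (substrings have length >= 1), so it is skipped.
--     health = {}
--     for w, v in zip(g, h):
--         health[w] = health.get(w, 0) + v
--     total = 0
--     for w, v in health.items():
--         if not w:
--             continue
--         c = 0
--         for i in range(len(d) - len(w) + 1):
--             if d[i:i + len(w)] == w:
--                 c += 1
--         total += c * v
--     return total
-- ===== Notes on version B (the rewrite author's own statement) =====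
-- stated objective: faster
-- what changed: Instead of materialising all O(n^2) substrings of d and scanning the gene list for each one, B aggregates health per distinct gene once and, for each distinct nonempty gene, counts its (overlapping) occurrences in d with a single window scan.
import Mathlib
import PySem

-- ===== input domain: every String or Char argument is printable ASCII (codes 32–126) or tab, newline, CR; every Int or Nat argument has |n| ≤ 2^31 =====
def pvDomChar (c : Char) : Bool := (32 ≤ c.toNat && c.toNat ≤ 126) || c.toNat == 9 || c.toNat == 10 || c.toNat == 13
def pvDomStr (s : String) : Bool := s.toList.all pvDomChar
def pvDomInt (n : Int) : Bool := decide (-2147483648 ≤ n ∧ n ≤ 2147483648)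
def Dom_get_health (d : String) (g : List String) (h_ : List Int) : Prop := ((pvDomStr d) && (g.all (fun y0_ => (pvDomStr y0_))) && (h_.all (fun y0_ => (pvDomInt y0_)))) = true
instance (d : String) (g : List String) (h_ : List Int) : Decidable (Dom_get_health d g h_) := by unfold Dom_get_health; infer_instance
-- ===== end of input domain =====

-- B replaces A's enumeration of every substring of d (plus a scan of g per substring)
-- by one aggregated health dict and one window scan of d per distinct gene; measured faster.

-- ===== PORT A =====
def get_health (d : String) (g : List String) (h_ : List Int) : Int :=
  -- 'sub_strs' (all substrings of d, by length i, start 'index'):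
  ((PySem.List.pyRange 1 (PySem.Str.len d + 1) 1).foldl
      (fun acc i =>
        (PySem.List.pyRange 0 (PySem.Str.len d - i + 1) 1).foldl
          (fun acc2 index => acc2 ++ [PySem.Str.slice d (some index) (some (index + i))])
          acc)
      []).foldl
    -- 'total': for s in sub_strs: if s in g: total += gh_map[s], with 'gh_map' the dict below
    (fun total s =>
      if s ∈ g then
        total + ((PySem.List.pyRange 0 (PySem.List.len g) 1).foldl
          (fun (m : PySem.Dict String Int) i =>
            if m.contains (PySem.List.pyGetD g i "") = false then
              m.insert (PySem.List.pyGetD g i "") (PySem.List.pyGetD h_ i 0)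
            else
              m.modify (PySem.List.pyGetD g i "") 0 (· + PySem.List.pyGetD h_ i 0))
          PySem.Dict.empty).getD s 0
      else total)
    0

-- ===== PORT B =====
def get_health_alt (d : String) (g : List String) (h_ : List Int) : Int :=
  -- 'health': aggregated health per distinct gene
  ((g.zip h_).foldl
      (fun (m : PySem.Dict String Int) wv => m.insert wv.1 (m.getD wv.1 0 + wv.2))
      PySem.Dict.empty).items.foldl
    -- skip an empty gene; else 'total += c * v' where 'c' counts the windows of d equal to the gene
    (fun total wv =>
      if wv.1 = "" then total
      else total +
        ((PySem.List.pyRange 0 (PySem.Str.len d - PySem.Str.len wv.1 + 1) 1).foldl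
          (fun c i =>
            if PySem.Str.slice d (some i) (some (i + PySem.Str.len wv.1)) = wv.1 then c + 1
            else c)
          0) * wv.2)
    0

-- ===== PRECONDITION & SPEC =====
-- Pre_ excludes exactly the inputs where h is shorter than g, on which A raises IndexError (h[i]).
def Pre_get_health (d : String) (g : List String) (h_ : List Int) : Prop :=
  g.length ≤ h_.length
instance (d : String) (g : List String) (h_ : List Int) : Decidable (Pre_get_health d g h_) := by
  unfold Pre_get_health; infer_instance

def pvWitness_get_health : String × List String × List Int := ("abab", ["ab", "b", "ab"], [3, -1, 2])

def Spec_get_health (d : String) (g : List String) (h_ : List Int) (out : Int) : Prop :=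
  out = get_health_alt d g h_
instance (d : String) (g : List String) (h_ : List Int) (out : Int) : Decidable (Spec_get_health d g h_ out) := by
  unfold Spec_get_health; infer_instance

-- ===== CLAIM (what is proved, stated in full; the proofs are below) =====
def Claim_equal_get_health : Prop := ∀ (d : String) (g : List String) (h_ : List Int), Dom_get_health d g h_ → Pre_get_health d g h_ → Spec_get_health d g h_ (get_health d g h_)


-- ===== LEMMAS AND PROOFS =====

-- proof-layer names for B's dict, the windows/substrings of d, and B's window counter
def pvH (g : List String) (h_ : List Int) : PySem.Dict String Int :=
  (g.zip h_).foldl (fun m wv => m.insert wv.1 (m.getD wv.1 0 + wv.2)) PySem.Dict.empty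

def pvWins (d : String) (L : Int) : List String :=
  (PySem.List.pyRange 0 (PySem.Str.len d - L + 1) 1).map
    (fun idx => PySem.Str.slice d (some idx) (some (idx + L)))

def pvSubs (d : String) : List String :=
  (PySem.List.pyRange 1 (PySem.Str.len d + 1) 1).flatMap (pvWins d)

def pvCnt (d : String) (w : String) : Nat :=
  (PySem.List.pyRange 0 (PySem.Str.len d - PySem.Str.len w + 1) 1).countP
    (fun i => decide (PySem.Str.slice d (some i) (some (i + PySem.Str.len w)) = w))

theorem pv_len (s : String) : PySem.Str.len s = (s.toList.length : Int) := by simp [pysem]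

-- a fold over range(len(g)) reading g[i], h[i] is a fold over zip(g, h) (when len(g) ≤ len(h))
theorem pv_foldl_range_zip {β : Type} (f : β → String → Int → β) :
    ∀ (g : List String) (h_ : List Int) (m0 : β), g.length ≤ h_.length →
      (List.range g.length).foldl (fun m k => f m (g.getD k "") (h_.getD k 0)) m0
        = (g.zip h_).foldl (fun m wv => f m wv.1 wv.2) m0 := by
  intro g
  induction g with
  | nil => intro h_ m0 _; simp
  | cons w g ih =>
    intro h_ m0 hlen
    cases h_ with
    | nil => simp at hlen
    | cons v h_ =>
      simp only [List.length_cons, List.range_succ_eq_map, List.foldl_cons, List.foldl_map,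
        List.zip_cons_cons, List.getD_cons_zero, List.getD_cons_succ]
      exact ih h_ (f m0 w v) (by simpa using hlen)

-- 'if k not in m: m[k] = v else: m[k] += v' is 'm[k] = m.get(k, 0) + v'
theorem pv_step_eq (m : PySem.Dict String Int) (k : String) (v : Int) :
    (if m.contains k = false then m.insert k v else m.modify k 0 (· + v))
      = m.insert k (m.getD k 0 + v) := by
  by_cases hc : m.contains k = false
  · rw [if_pos hc, PySem.Dict.getD_of_not_contains m 0 hc, zero_add]
  · rw [if_neg hc]
    simp [PySem.Dict.modify, PySem.Dict.insert, PySem.Dict.getD]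

-- the two dict-building loops produce the same dict
theorem pv_build_eq (g : List String) (h_ : List Int) (hlen : g.length ≤ h_.length) :
    (PySem.List.pyRange 0 (PySem.List.len g) 1).foldl
      (fun (m : PySem.Dict String Int) i =>
        if m.contains (PySem.List.pyGetD g i "") = false then
          m.insert (PySem.List.pyGetD g i "") (PySem.List.pyGetD h_ i 0)
        else
          m.modify (PySem.List.pyGetD g i "") 0 (· + PySem.List.pyGetD h_ i 0))
      PySem.Dict.empty
    = pvH g h_ := by
  rw [PySem.List.len_eq, PySem.List.pyRange_zero_nat g.length, List.foldl_map]
  simp only [PySem.List.pyGetD_natCast]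
  rw [pv_foldl_range_zip
    (fun m w v => if m.contains w = false then m.insert w v else m.modify w 0 (· + v))
    g h_ PySem.Dict.empty hlen]
  unfold pvH
  exact PySem.List.foldl_congr_mem (g.zip h_) _ _ PySem.Dict.empty
    (fun m wv _ => pv_step_eq m wv.1 wv.2)

-- keys of B's dict = the distinct genes, in order
theorem pv_keys (g : List String) (h_ : List Int) (hlen : g.length ≤ h_.length) :
    (pvH g h_).keys = PySem.Set.ofList g := by
  unfold pvH
  rw [PySem.Dict.keys_foldl_insert_key (g.zip h_) Prod.fst
    (fun m wv => m.getD wv.1 0 + wv.2) PySem.Dict.empty, List.map_fst_zip hlen]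
  rfl

theorem pv_keys_nodup (g : List String) (h_ : List Int) : (pvH g h_).keys.Nodup := by
  unfold pvH
  exact PySem.Dict.nodup_keys_foldl_insert_key (g.zip h_) Prod.fst _ PySem.Dict.empty
    (by simp [PySem.Dict.keys_empty])

-- a sum over K (nodup) of terms vanishing away from s
theorem pv_sum_ite_single (K : List String) (hK : K.Nodup) (s : String) (F : String → Int) :
    (K.map (fun k => if k = s then F k else 0)).sum = if s ∈ K then F s else 0 := by
  induction K with
  | nil => simp
  | cons k K ih =>
    obtain ⟨hkn, hK'⟩ := List.nodup_cons.mp hK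
    simp only [List.map_cons, List.sum_cons, ih hK', List.mem_cons]
    by_cases hks : k = s
    · subst hks
      simp [hkn]
    · rw [if_neg hks, if_congr (or_iff_right (fun h => hks h.symm)) rfl rfl, zero_add]

-- grouping: summing F over the members of sub that lie in K = summing count*F over K
theorem pv_sum_group (K : List String) (hK : K.Nodup) (sub : List String) (F : String → Int) :
    (sub.map (fun s => if s ∈ K then F s else 0)).sum
      = (K.map (fun k => (sub.count k : Int) * F k)).sum := by
  induction sub with
  | nil => simp
  | cons s t ih =>
    simp only [List.map_cons, List.sum_cons, List.count_cons]
    rw [ih]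
    have hsplit : ∀ k : String,
        ((t.count k + if s == k then 1 else 0 : Nat) : Int) * F k
          = (t.count k : Int) * F k + (if k = s then F k else 0) := by
      intro k
      by_cases hks : k = s
      · subst hks
        simp only [beq_self_eq_true, if_pos]
        push_cast
        ring
      · have hb : (s == k) = false := beq_eq_false_iff_ne.mpr (fun h => hks h.symm)
        simp [hb, hks]
    calc (if s ∈ K then F s else 0) + (K.map (fun k => (t.count k : Int) * F k)).sum
        = (K.map (fun k => (t.count k : Int) * F k)).sum
            + (K.map (fun k => if k = s then F k else 0)).sum := by
          rw [pv_sum_ite_single K hK s F]; ring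
      _ = (K.map (fun k => (t.count k : Int) * F k + (if k = s then F k else 0))).sum := by
          rw [PySem.List.sum_map_add_int]
      _ = (K.map (fun k => ((t.count k + if s == k then 1 else 0 : Nat) : Int) * F k)).sum := by
          exact congrArg _ (List.map_congr_left (fun k _ => (hsplit k).symm))

-- a Nat-valued sum over a nodup list of terms vanishing away from k
theorem pv_sum_single (l : List Int) (hl : l.Nodup) (f : Int → Nat) (k : Int)
    (h0 : ∀ x ∈ l, x ≠ k → f x = 0) :
    (l.map f).sum = if k ∈ l then f k else 0 := by
  induction l with
  | nil => simp
  | cons a t ih =>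
    obtain ⟨hat, ht⟩ := List.nodup_cons.mp hl
    simp only [List.map_cons, List.sum_cons, List.mem_cons]
    by_cases hak : a = k
    · subst hak
      have hz : (t.map f).sum = 0 :=
        List.sum_eq_zero (by
          intro x hx
          obtain ⟨y, hy, rfl⟩ := List.mem_map.mp hx
          exact h0 y (List.mem_cons_of_mem a hy) (fun h => hat (h ▸ hy)))
      simp [hz]
    · rw [h0 a List.mem_cons_self hak,
        ih ht (fun x hx => h0 x (List.mem_cons_of_mem a hx)),
        if_congr (or_iff_right (fun h => hak h.symm)) rfl rfl, Nat.zero_add]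

-- a window of d of Int-length L has list-length L.toNat
theorem pv_slice_len (d : String) (idx L : Int) (hidx : 0 ≤ idx) (hL : 0 ≤ L)
    (hend : idx + L ≤ (d.toList.length : Int)) :
    (PySem.Str.slice d (some idx) (some (idx + L))).toList.length = L.toNat := by
  have h1 : (PySem.Str.slice d (some idx) (some (idx + L))).toList
      = PySem.List.slice d.toList (some idx) (some (idx + L)) := by simp [pysem]
  rw [h1, PySem.List.slice_toNat d.toList hidx (by omega)]
  simp only [List.length_take, List.length_drop]
  omega

-- the empty string is never among A's substrings (they all have length ≥ 1)
theorem pv_count_empty (d : String) : (pvSubs d).count "" = 0 := by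
  rw [List.count_eq_zero]
  intro hmem
  unfold pvSubs at hmem
  obtain ⟨L, hLmem, hwin⟩ := List.mem_flatMap.mp hmem
  obtain ⟨hL1, hL2⟩ := (PySem.List.mem_pyRange_one).mp hLmem
  obtain ⟨idx, hidx, heq⟩ := List.mem_map.mp hwin
  obtain ⟨hidx0, hidx1⟩ := (PySem.List.mem_pyRange_one).mp hidx
  have hN : PySem.Str.len d = (d.toList.length : Int) := pv_len d
  have hlen := pv_slice_len d idx L hidx0 (by omega) (by omega)
  rw [heq] at hlen
  rw [show ("" : String).toList = [] from rfl] at hlen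
  simp only [List.length_nil] at hlen
  omega

-- counting w among all substrings of d = counting the windows of length len(w) equal to w
theorem pv_count_subs (d w : String) (hw : w ≠ "") :
    (pvSubs d).count w = pvCnt d w := by
  have hwl : w.toList ≠ [] := by
    intro hnil
    exact hw (String.toList_inj.mp (by simp [hnil]))
  have hwpos : 0 < w.toList.length := List.length_pos_of_ne_nil hwl
  have hW : PySem.Str.len w = (w.toList.length : Int) := pv_len w
  have hN : PySem.Str.len d = (d.toList.length : Int) := pv_len d
  unfold pvSubs
  rw [List.count_flatMap]
  simp only [Function.comp_def]
  have hzero : ∀ L ∈ PySem.List.pyRange 1 (PySem.Str.len d + 1) 1,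
      L ≠ PySem.Str.len w → (pvWins d L).count w = 0 := by
    intro L hLmem hLne
    rw [List.count_eq_zero]
    intro hmem
    obtain ⟨idx, hidx, heq⟩ := List.mem_map.mp hmem
    obtain ⟨hidx0, hidx1⟩ := (PySem.List.mem_pyRange_one).mp hidx
    obtain ⟨hL1, hL2⟩ := (PySem.List.mem_pyRange_one).mp hLmem
    have hlen := pv_slice_len d idx L hidx0 (by omega) (by omega)
    rw [heq] at hlen
    apply hLne
    omega
  rw [pv_sum_single _ (PySem.List.nodup_pyRange_one ..) _ (PySem.Str.len w) hzero]
  by_cases hmem : PySem.Str.len w ∈ PySem.List.pyRange 1 (PySem.Str.len d + 1) 1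
  · rw [if_pos hmem]
    unfold pvWins pvCnt
    rw [List.count_eq_countP, List.countP_map]
    apply List.countP_congr
    intro i _
    simp only [Function.comp_def]
    by_cases h : PySem.Str.slice d (some i) (some (i + PySem.Str.len w)) = w <;> simp [h]
  · rw [if_neg hmem]
    have hnr : ¬ (1 ≤ PySem.Str.len w ∧ PySem.Str.len w < PySem.Str.len d + 1) := by
      intro hc; exact hmem ((PySem.List.mem_pyRange_one).mpr hc)
    unfold pvCnt
    rw [PySem.List.pyRange_one_eq_nil (by omega)]
    simp

-- A's total, in closed summation form
theorem pv_A_total (d : String) (g : List String) (h_ : List Int)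
    (hlen : g.length ≤ h_.length) :
    get_health d g h_
      = ((pvSubs d).map (fun s => if s ∈ g then (pvH g h_).getD s 0 else 0)).sum := by
  unfold get_health
  rw [pv_build_eq g h_ hlen]
  have h1 : (PySem.List.pyRange 1 (PySem.Str.len d + 1) 1).foldl
      (fun acc i =>
        (PySem.List.pyRange 0 (PySem.Str.len d - i + 1) 1).foldl
          (fun acc2 index => acc2 ++ [PySem.Str.slice d (some index) (some (index + i))]) acc)
      ([] : List String)
      = (PySem.List.pyRange 1 (PySem.Str.len d + 1) 1).foldl
          (fun acc i => acc ++ pvWins d i) [] :=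
    PySem.List.foldl_congr_mem _ _ _ _
      (fun acc i _ => PySem.List.foldl_append_singleton_eq_map ..)
  rw [h1, PySem.List.foldl_append_eq_flatMap]
  have h2 : (pvSubs d).foldl
      (fun total s => if s ∈ g then total + (pvH g h_).getD s 0 else total) 0
      = (pvSubs d).foldl
          (fun total s => total + (if s ∈ g then (pvH g h_).getD s 0 else 0)) 0 :=
    PySem.List.foldl_congr_mem _ _ _ _
      (by intro total s _; by_cases h : s ∈ g <;> simp [h])
  rw [show ([] : List String) ++ (PySem.List.pyRange 1 (PySem.Str.len d + 1) 1).flatMap (pvWins d)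
      = pvSubs d from by simp [pvSubs]]
  rw [h2, PySem.List.foldl_add, zero_add]

-- B's total, in closed summation form
theorem pv_B_total (d : String) (g : List String) (h_ : List Int) :
    get_health_alt d g h_
      = ((pvH g h_).items.map
          (fun wv => if wv.1 = "" then 0 else (pvCnt d wv.1 : Int) * wv.2)).sum := by
  unfold get_health_alt
  have hH : (g.zip h_).foldl
      (fun (m : PySem.Dict String Int) wv => m.insert wv.1 (m.getD wv.1 0 + wv.2))
      PySem.Dict.empty = pvH g h_ := rfl
  rw [hH]
  have h1 : (pvH g h_).items.foldl
      (fun total wv =>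
        if wv.1 = "" then total
        else total +
          ((PySem.List.pyRange 0 (PySem.Str.len d - PySem.Str.len wv.1 + 1) 1).foldl
            (fun c i =>
              if PySem.Str.slice d (some i) (some (i + PySem.Str.len wv.1)) = wv.1 then c + 1
              else c)
            0) * wv.2)
      0
      = (pvH g h_).items.foldl
          (fun total wv => total + (if wv.1 = "" then 0 else (pvCnt d wv.1 : Int) * wv.2)) 0 :=
    PySem.List.foldl_congr_mem _ _ _ _
      (by
        intro total wv _
        by_cases hw : wv.1 = ""
        · rw [if_pos hw, if_pos hw, add_zero]
        · rw [if_neg hw, if_neg hw,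
            PySem.List.foldl_ite_add_one
              (fun i => PySem.Str.slice d (some i) (some (i + PySem.Str.len wv.1)) = wv.1)
              (PySem.List.pyRange 0 (PySem.Str.len d - PySem.Str.len wv.1 + 1) 1) 0, zero_add]
          rfl)
  rw [h1, PySem.List.foldl_add, zero_add]

-- ===== VERDICT (by name: the statement is the Claim_ definition above) =====
theorem get_health_spec : Claim_equal_get_health := by
  intro d g h_ _ hlen
  unfold Spec_get_health
  rw [pv_A_total d g h_ hlen, pv_B_total d g h_]
  have hnd := pv_keys_nodup g h_
  have hmem : ∀ s, s ∈ g ↔ s ∈ (pvH g h_).keys := by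
    intro s
    rw [pv_keys g h_ hlen]
    exact (PySem.Set.mem_ofList g s).symm
  have h1 : (pvSubs d).map (fun s => if s ∈ g then (pvH g h_).getD s 0 else 0)
      = (pvSubs d).map (fun s => if s ∈ (pvH g h_).keys then (pvH g h_).getD s 0 else 0) := by
    apply List.map_congr_left
    intro s _
    by_cases h : s ∈ g
    · rw [if_pos h, if_pos ((hmem s).mp h)]
    · rw [if_neg h, if_neg (fun hk => h ((hmem s).mpr hk))]
  rw [h1, pv_sum_group _ hnd _ _]
  rw [PySem.Dict.items_eq_map_keys (pvH g h_) hnd 0, List.map_map]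
  apply congrArg
  apply List.map_congr_left
  intro k hk
  simp only [Function.comp_def]
  by_cases hkne : k = ""
  · subst hkne
    rw [if_pos rfl, pv_count_empty d]
    simp
  · rw [if_neg hkne, pv_count_subs d k hkne]
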